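-- pv_equiv track=rewrite | github.com/OuiameBahou/Trading-Signals-Project | src/analytics/headline_synthesizer.py | _naive_dedup
-- ===== SOURCE A (Python) =====
-- from typing import List, Dict, Any
--
-- def _naive_dedup(headlines: List[Dict[str, Any]]) -> List[List[Dict[str, Any]]]:
--     """
--     Fallback clustering using simple text-overlap dedup (first 60 chars).
--     Used only when OpenAI is unavailable.
--     """
--     clusters: List[List[Dict[str, Any]]] = []
--     seen_keys = set()
--     for h in headlines:
--         key = h.get("text", "")[:60].strip().lower()
--         if key in seen_keys:
--             # Try to attach to existing cluster
--             for c in clusters: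
--                 if c[0].get("text", "")[:60].strip().lower() == key:
--                     c.append(h)
--                     break
--         else:
--             seen_keys.add(key)
--             clusters.append([h])
--     return clusters
-- ===== SOURCE B (Python) =====
-- from typing import List, Dict, Any
--
-- def _naive_dedup(headlines: List[Dict[str, Any]]) -> List[List[Dict[str, Any]]]:
--     """One-pass keyed grouping: dict key -> cluster list (insertion order)."""
--     clusters: Dict[str, List[Dict[str, Any]]] = {}
--     for h in headlines:
--         key = h.get("text", "")[:60].strip().lower()
--         clusters.setdefault(key, []).append(h)
--     return list(clusters.values())
-- ===== Notes on version B (the rewrite author's own statement) =====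
-- stated objective: simpler
-- what changed: Replaces the seen-keys set, the if/else branch and the inner rescan of all clusters with a single dict built in one pass (key -> cluster via setdefault), returning its values; insertion order reproduces A's cluster and within-cluster order.
import Mathlib
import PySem

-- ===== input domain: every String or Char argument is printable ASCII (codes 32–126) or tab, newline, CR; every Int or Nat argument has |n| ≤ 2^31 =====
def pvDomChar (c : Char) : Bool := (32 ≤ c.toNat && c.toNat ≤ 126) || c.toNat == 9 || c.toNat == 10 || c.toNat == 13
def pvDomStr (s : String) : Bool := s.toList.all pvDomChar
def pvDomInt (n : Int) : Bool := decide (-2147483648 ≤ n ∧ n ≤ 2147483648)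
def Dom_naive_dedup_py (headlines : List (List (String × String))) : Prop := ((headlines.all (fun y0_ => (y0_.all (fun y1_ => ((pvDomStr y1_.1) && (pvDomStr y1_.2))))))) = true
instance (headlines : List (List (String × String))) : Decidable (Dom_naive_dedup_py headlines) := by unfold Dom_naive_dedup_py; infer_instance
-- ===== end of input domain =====

-- B replaces A's seen-set + branch + inner rescan of clusters by one dict key→cluster built in a single pass (simpler, no rescan).

-- h.get("text", "")[:60].strip().lower()  (shared by both Pythons verbatim)
def pvKey (h : List (String × String)) : String :=
  PySem.Str.lower (PySem.Str.strip (PySem.Str.slice ((PySem.Dict.mk h).getD "text" "") none (some 60)))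

-- ===== PORT A =====
-- the inner 'for c in clusters: if c[0]… == key: c.append(h); break'
def pvAttach (k : String) (h : List (String × String)) :
    List (List (List (String × String))) → List (List (List (String × String)))
  | [] => []
  | c :: rest =>
    if pvKey (PySem.List.pyGetD c 0 []) == k then (c ++ [h]) :: rest
    else c :: pvAttach k h rest

def naive_dedup_py (headlines : List (List (String × String))) : List (List (List (String × String))) :=
  (headlines.foldl
    (fun st h =>
      let k := pvKey h
      if PySem.Set.contains st.2 k then (pvAttach k h st.1, st.2)
      else (st.1 ++ [[h]], PySem.Set.add st.2 k))
    (([] : List (List (List (String × String)))), ([] : PySem.Set String))).1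

-- ===== PORT B =====
def naive_dedup_py_alt (headlines : List (List (String × String))) : List (List (List (String × String))) :=
  (headlines.foldl
    (fun d h => d.modify (pvKey h) [] (· ++ [h]))
    (PySem.Dict.empty : PySem.Dict String (List (List (String × String))))).values

-- ===== PRECONDITION & SPEC =====
def Spec_naive_dedup_py (headlines : List (List (String × String))) (out : List (List (List (String × String)))) : Prop := out = naive_dedup_py_alt headlines
instance (headlines : List (List (String × String))) (out : List (List (List (String × String)))) : Decidable (Spec_naive_dedup_py headlines out) := by unfold Spec_naive_dedup_py; infer_instance

-- ===== CLAIM (what is proved, stated in full; the proofs are below) =====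
def Claim_equal_naive_dedup_py : Prop := ∀ (headlines : List (List (String × String))), Dom_naive_dedup_py headlines → Spec_naive_dedup_py headlines (naive_dedup_py headlines)

-- ===== LEMMAS AND PROOFS =====

-- every cluster stored in the dict is nonempty and headed by an element with its key
def pvInv (d : PySem.Dict String (List (List (String × String)))) : Prop :=
  d.keys.Nodup ∧ ∀ p ∈ d.items, ∃ h0 t, p.2 = h0 :: t ∧ pvKey h0 = p.1

set_option maxHeartbeats 1000000 in
lemma pvAttach_map (k : String) (h : List (String × String)) :
    ∀ (its : List (String × List (List (String × String)))) (v : List (List (String × String))),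
      (its.map (·.1)).Nodup →
      (∀ p ∈ its, ∃ h0 t, p.2 = h0 :: t ∧ pvKey h0 = p.1) →
      (k, v) ∈ its →
      pvAttach k h (its.map (·.2)) =
        (its.map (fun p => if p.1 == k then (k, v ++ [h]) else p)).map (·.2) := by
  intro its
  induction its with
  | nil => intro v _ _ hm; cases hm
  | cons p its ih =>
    intro v hnd hinv hm
    obtain ⟨h0, t, hp2, hk0⟩ := hinv p (by simp)
    simp only [List.map_cons, List.nodup_cons] at hnd
    by_cases hpk : p.1 = k
    · -- head matches; by nodup the membership must be the head
      have hpv : p = (k, v) := by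
        rcases List.mem_cons.mp hm with h1 | h1
        · exact h1.symm
        · exact absurd (by simpa [hpk] using List.mem_map_of_mem (f := (·.1)) h1) hnd.1
      have hcond : (pvKey (PySem.List.pyGetD p.2 0 []) == k) = true := by
        simp [hp2, PySem.List.pyGetD_zero_cons, hk0, hpk]
      have htail : its.map (fun q => if q.1 == k then (k, v ++ [h]) else q) = its := by
        calc its.map (fun q => if q.1 == k then (k, v ++ [h]) else q)
            = its.map id := by
              apply List.map_congr_left
              intro q hq
              have hqk : q.1 ≠ k := fun he =>
                hnd.1 (by simpa [hpk, he] using List.mem_map_of_mem (f := (·.1)) hq)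
              simp [hqk]
          _ = its := List.map_id its
      simp only [List.map_cons]
      rw [pvAttach]
      simp only [hcond, htail]
      subst hpv
      simp
    · have hcond : (pvKey (PySem.List.pyGetD p.2 0 []) == k) = false := by
        simp [hp2, PySem.List.pyGetD_zero_cons, hk0, hpk]
      have hm' : (k, v) ∈ its := by
        rcases List.mem_cons.mp hm with h1 | h1
        · exact absurd (congrArg Prod.fst h1).symm hpk  -- h1 : (k,v) = p
        · exact h1
      have hpk' : (p.1 == k) = false := by simp [hpk]
      simp only [List.map_cons]
      rw [pvAttach]
      simp only [hcond, Bool.false_eq_true, if_false, hpk']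
      rw [ih v hnd.2 (fun q hq => hinv q (by simp [hq])) hm']

set_option maxHeartbeats 1000000 in
lemma pvStep (d : PySem.Dict String (List (List (String × String)))) (h : List (String × String))
    (hinv : pvInv d) :
    (if PySem.Set.contains d.keys (pvKey h) then (pvAttach (pvKey h) h d.values, d.keys)
     else (d.values ++ [[h]], PySem.Set.add d.keys (pvKey h)))
      = ((d.modify (pvKey h) [] (· ++ [h])).values, (d.modify (pvKey h) [] (· ++ [h])).keys)
    ∧ pvInv (d.modify (pvKey h) [] (· ++ [h])) := by
  obtain ⟨hnd, hheads⟩ := hinv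
  set k := pvKey h with hkdef
  by_cases hk : k ∈ d.keys
  · -- duplicate key: A rescans clusters, B overwrites in place
    have hcont : d.contains k = true := (PySem.Dict.contains_iff_mem_keys d k).mpr hk
    have hsc : PySem.Set.contains d.keys k = true := (PySem.Set.contains_iff d.keys k).mpr hk
    obtain ⟨v, hkv⟩ : ∃ v, (k, v) ∈ d.items := by
      obtain ⟨p, hp, hp1⟩ := List.mem_map.mp hk
      exact ⟨p.2, by simpa [← hp1] using hp⟩
    have hgetD : d.getD k [] = v := PySem.Dict.getD_of_mem_items d hkv hnd []
    have hmod : d.modify k [] (· ++ [h]) = d.insert k (v ++ [h]) := by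
      simp [PySem.Dict.modify, hgetD]
    have hitems : (d.insert k (v ++ [h])).items
        = d.items.map (fun p => if p.1 == k then (k, v ++ [h]) else p) :=
      PySem.Dict.items_insert_of_contains d _ hcont
    have hkeys : (d.insert k (v ++ [h])).keys = d.keys := by
      simp only [PySem.Dict.keys, hitems, List.map_map]
      apply List.map_congr_left
      intro p hp
      by_cases hpk : p.1 = k <;> simp [hpk]
    have hvals : pvAttach k h d.values = (d.insert k (v ++ [h])).values := by
      simp only [PySem.Dict.values, hitems]
      exact pvAttach_map k h d.items v hnd hheads hkv
    refine ⟨by simp [hk, hmod, hvals, hkeys], ?_⟩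
    rw [hmod]
    refine ⟨by rw [hkeys]; exact hnd, ?_⟩
    intro p hp
    rw [hitems] at hp
    obtain ⟨q, hq, hqe⟩ := List.mem_map.mp hp
    obtain ⟨h0, t, hq2, hq1⟩ := hheads q hq
    by_cases hqk : q.1 = k
    · obtain ⟨v0, t0, hv, hv1⟩ := hheads (k, v) hkv
      have hv' : v = v0 :: t0 := hv
      have hv1' : pvKey v0 = k := hv1
      subst hqe
      refine ⟨v0, t0 ++ [h], by simp [hqk, hv'], by simp [hqk, hv1']⟩
    · subst hqe
      exact ⟨h0, t, by simp [hqk, hq2], by simp [hqk, hq1]⟩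
  · -- fresh key: both append a new singleton cluster at the end
    have hcont : d.contains k = false := by
      cases hc : d.contains k
      · rfl
      · exact absurd ((PySem.Dict.contains_iff_mem_keys d k).mp hc) hk
    have hsc : PySem.Set.contains d.keys k = false := by
      cases hc : PySem.Set.contains d.keys k
      · rfl
      · exact absurd ((PySem.Set.contains_iff d.keys k).mp hc) hk
    have hgetD : d.getD k [] = [] := PySem.Dict.getD_of_not_contains d [] hcont
    have hmod : d.modify k [] (· ++ [h]) = d.insert k [h] := by
      simp [PySem.Dict.modify, hgetD]
    have hitems : (d.insert k [h]).items = d.items ++ [(k, [h])] :=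
      PySem.Dict.items_insert_of_not_contains d _ hcont
    have hk' : k ∉ List.map (fun x => x.1) d.items := hk
    refine ⟨?_, ?_⟩
    · rw [hmod]
      simp [hk', PySem.Dict.values, PySem.Dict.keys, hitems]
    · rw [hmod]
      constructor
      · simp only [PySem.Dict.keys, hitems, List.map_append, List.map_cons, List.map_nil]
        exact List.Nodup.append hnd (List.nodup_singleton _) (by
          intro a ha hb
          simp only [List.mem_singleton] at hb
          subst hb
          exact hk ha)
      · intro p hp
        rw [hitems] at hp
        rcases List.mem_append.mp hp with h1 | h1
        · exact hheads p h1
        · simp only [List.mem_singleton] at h1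
          exact ⟨h, [], by simp [h1], by simp [h1, hkdef]⟩

lemma pvMain : ∀ (hs : List (List (String × String)))
    (d : PySem.Dict String (List (List (String × String)))), pvInv d →
    (hs.foldl
      (fun st h =>
        let k := pvKey h
        if PySem.Set.contains st.2 k then (pvAttach k h st.1, st.2)
        else (st.1 ++ [[h]], PySem.Set.add st.2 k))
      (d.values, d.keys)).1
    = (hs.foldl (fun d h => d.modify (pvKey h) [] (· ++ [h])) d).values := by
  intro hs
  induction hs with
  | nil => intro d _; rfl
  | cons h hs ih =>
    intro d hinv
    obtain ⟨hstep, hinv'⟩ := pvStep d h hinv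
    simp only [List.foldl_cons]
    rw [hstep]
    exact ih _ hinv'

-- ===== VERDICT (by name: the statement is the Claim_ definition above) =====
theorem naive_dedup_py_spec : Claim_equal_naive_dedup_py := by
  intro headlines _
  unfold Spec_naive_dedup_py naive_dedup_py naive_dedup_py_alt
  have hinv : pvInv (PySem.Dict.empty : PySem.Dict String (List (List (String × String)))) := by
    constructor
    · simp [PySem.Dict.keys, PySem.Dict.empty]
    · intro p hp; simp [PySem.Dict.empty] at hp
  have := pvMain headlines PySem.Dict.empty hinv
  simpa [PySem.Dict.values, PySem.Dict.keys, PySem.Dict.empty] using this
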